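-- pv_equiv track=rewrite | github.com/smelch-blip/my-stock-app | app.py | infer_sector_from_industry
-- ===== SOURCE A (Python) =====
-- def infer_sector_from_industry(industry: str) -> str:
--     ind = (industry or "").lower()
--     if any(k in ind for k in ["bank", "nbfc", "finance", "financial", "insurance", "brok", "asset management"]):
--         return "Financial Services"
--     if any(k in ind for k in ["software", "it services", "information technology", "technology"]):
--         return "Technology"
--     if any(k in ind for k in ["pharma", "pharmaceutical", "hospital", "health", "diagnostic"]):
--         return "Healthcare"
--     if any(k in ind for k in ["power", "utility", "electric", "water utility", "gas utility"]):
--         return "Utilities"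
--     if any(k in ind for k in ["oil", "gas", "refining", "energy", "exploration"]):
--         return "Energy"
--     if any(k in ind for k in ["steel", "metal", "mining", "paper", "chemical", "materials", "cement"]):
--         return "Basic Materials"
--     if any(k in ind for k in ["telecom", "media", "entertainment", "communication"]):
--         return "Communication Services"
--     if any(k in ind for k in ["real estate", "reit", "property"]):
--         return "Real Estate"
--     if any(k in ind for k in ["fmcg", "beverage", "foods", "consumer", "retail", "apparel"]):
--         return "Consumer Defensive"
--     if any(k in ind for k in ["auto", "automobile", "hotel", "travel", "leisure"]):
--         return "Consumer Cyclical"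
--     if any(k in ind for k in ["industrial", "engineering", "capital goods", "construction", "infrastructure", "logistics"]):
--         return "Industrials"
--     return "Default"
-- ===== SOURCE B (Python) =====
-- SECTORS = [
--     "Financial Services",
--     "Technology",
--     "Healthcare",
--     "Utilities",
--     "Energy",
--     "Basic Materials",
--     "Communication Services",
--     "Real Estate",
--     "Consumer Defensive",
--     "Consumer Cyclical",
--     "Industrials",
-- ]
--
-- # Flat keyword table: (keyword, priority index into SECTORS).
-- KEYWORDS = [
--     ("bank", 0), ("nbfc", 0), ("finance", 0), ("financial", 0), ("insurance", 0), ("brok", 0), ("asset management", 0),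
--     ("software", 1), ("it services", 1), ("information technology", 1), ("technology", 1),
--     ("pharma", 2), ("pharmaceutical", 2), ("hospital", 2), ("health", 2), ("diagnostic", 2),
--     ("power", 3), ("utility", 3), ("electric", 3), ("water utility", 3), ("gas utility", 3),
--     ("oil", 4), ("gas", 4), ("refining", 4), ("energy", 4), ("exploration", 4),
--     ("steel", 5), ("metal", 5), ("mining", 5), ("paper", 5), ("chemical", 5), ("materials", 5), ("cement", 5),
--     ("telecom", 6), ("media", 6), ("entertainment", 6), ("communication", 6),
--     ("real estate", 7), ("reit", 7), ("property", 7),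
--     ("fmcg", 8), ("beverage", 8), ("foods", 8), ("consumer", 8), ("retail", 8), ("apparel", 8),
--     ("auto", 9), ("automobile", 9), ("hotel", 9), ("travel", 9), ("leisure", 9),
--     ("industrial", 10), ("engineering", 10), ("capital goods", 10), ("construction", 10), ("infrastructure", 10), ("logistics", 10),
-- ]
--
-- def infer_sector_from_industry(industry: str) -> str:
--     ind = (industry or "").lower()
--     hits = [p for k, p in KEYWORDS if k in ind]
--     return SECTORS[min(hits)] if hits else "Default"
-- ===== Notes on version B (the rewrite author's own statement) =====
-- stated objective: alternative
-- what changed: The eleven-branch early-return if-chain is replaced by a flat keyword->priority table: one comprehension collects the priorities of all matching keywords and the sector is selected arithmetically as SECTORS[min(hits)] (no short-circuit chain).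
import Mathlib
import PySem

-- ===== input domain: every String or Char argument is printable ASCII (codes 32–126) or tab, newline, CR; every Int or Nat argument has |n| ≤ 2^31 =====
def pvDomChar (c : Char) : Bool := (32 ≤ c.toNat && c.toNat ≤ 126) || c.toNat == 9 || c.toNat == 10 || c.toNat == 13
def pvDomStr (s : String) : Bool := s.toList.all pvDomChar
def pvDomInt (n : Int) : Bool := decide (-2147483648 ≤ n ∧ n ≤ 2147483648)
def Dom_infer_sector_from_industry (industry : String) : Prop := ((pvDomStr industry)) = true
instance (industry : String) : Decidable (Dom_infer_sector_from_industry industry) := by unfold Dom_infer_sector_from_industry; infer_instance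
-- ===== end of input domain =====

-- B replaces A's early-return if-chain by a flat keyword→priority table: collect the priorities of
-- all matching keywords, then select SECTORS[min(hits)] (objective: alternative, same cost).

-- ===== PORT A =====
def infer_sector_from_industry (industry : String) : String :=
  let ind := PySem.Str.lower industry   -- (industry or "") is the identity on strings here
  if ["bank", "nbfc", "finance", "financial", "insurance", "brok", "asset management"].any (fun k => PySem.Str.isIn k ind) then "Financial Services"
  else if ["software", "it services", "information technology", "technology"].any (fun k => PySem.Str.isIn k ind) then "Technology"
  else if ["pharma", "pharmaceutical", "hospital", "health", "diagnostic"].any (fun k => PySem.Str.isIn k ind) then "Healthcare"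
  else if ["power", "utility", "electric", "water utility", "gas utility"].any (fun k => PySem.Str.isIn k ind) then "Utilities"
  else if ["oil", "gas", "refining", "energy", "exploration"].any (fun k => PySem.Str.isIn k ind) then "Energy"
  else if ["steel", "metal", "mining", "paper", "chemical", "materials", "cement"].any (fun k => PySem.Str.isIn k ind) then "Basic Materials"
  else if ["telecom", "media", "entertainment", "communication"].any (fun k => PySem.Str.isIn k ind) then "Communication Services"
  else if ["real estate", "reit", "property"].any (fun k => PySem.Str.isIn k ind) then "Real Estate"
  else if ["fmcg", "beverage", "foods", "consumer", "retail", "apparel"].any (fun k => PySem.Str.isIn k ind) then "Consumer Defensive"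
  else if ["auto", "automobile", "hotel", "travel", "leisure"].any (fun k => PySem.Str.isIn k ind) then "Consumer Cyclical"
  else if ["industrial", "engineering", "capital goods", "construction", "infrastructure", "logistics"].any (fun k => PySem.Str.isIn k ind) then "Industrials"
  else "Default"

-- ===== PORT B =====
def sectorNames : List String :=
  ["Financial Services", "Technology", "Healthcare", "Utilities", "Energy", "Basic Materials",
   "Communication Services", "Real Estate", "Consumer Defensive", "Consumer Cyclical", "Industrials"]

def keywordTable : List (String × Nat) :=
  [("bank", 0), ("nbfc", 0), ("finance", 0), ("financial", 0), ("insurance", 0), ("brok", 0), ("asset management", 0),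
   ("software", 1), ("it services", 1), ("information technology", 1), ("technology", 1),
   ("pharma", 2), ("pharmaceutical", 2), ("hospital", 2), ("health", 2), ("diagnostic", 2),
   ("power", 3), ("utility", 3), ("electric", 3), ("water utility", 3), ("gas utility", 3),
   ("oil", 4), ("gas", 4), ("refining", 4), ("energy", 4), ("exploration", 4),
   ("steel", 5), ("metal", 5), ("mining", 5), ("paper", 5), ("chemical", 5), ("materials", 5), ("cement", 5),
   ("telecom", 6), ("media", 6), ("entertainment", 6), ("communication", 6),
   ("real estate", 7), ("reit", 7), ("property", 7),
   ("fmcg", 8), ("beverage", 8), ("foods", 8), ("consumer", 8), ("retail", 8), ("apparel", 8),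
   ("auto", 9), ("automobile", 9), ("hotel", 9), ("travel", 9), ("leisure", 9),
   ("industrial", 10), ("engineering", 10), ("capital goods", 10), ("construction", 10), ("infrastructure", 10), ("logistics", 10)]

-- 'SECTORS[min(hits)] if hits else "Default"': min? is none exactly when hits is empty;
-- the priority min(hits) is a literal Nat < 11, so list indexing is getD (always in range).
def infer_sector_from_industry_alt (industry : String) : String :=
  let ind := PySem.Str.lower industry
  let hits := (keywordTable.filter (fun e => PySem.Str.isIn e.1 ind)).map (fun e => e.2)
  match PySem.List.min? hits (fun x => x) with
  | some m => sectorNames.getD m "Default"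
  | none => "Default"

-- ===== PRECONDITION & SPEC =====
def Spec_infer_sector_from_industry (industry : String) (out : String) : Prop := out = infer_sector_from_industry_alt industry
instance (industry : String) (out : String) : Decidable (Spec_infer_sector_from_industry industry out) := by unfold Spec_infer_sector_from_industry; infer_instance

-- ===== CLAIM =====
def Claim_equal_infer_sector_from_industry : Prop := ∀ (industry : String), Dom_infer_sector_from_industry industry → Spec_infer_sector_from_industry industry (infer_sector_from_industry industry)

-- ===== LEMMAS AND PROOFS =====

-- The keyword groups of A, in priority order.
def kwGroups : List (List String) :=
  [["bank", "nbfc", "finance", "financial", "insurance", "brok", "asset management"],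
   ["software", "it services", "information technology", "technology"],
   ["pharma", "pharmaceutical", "hospital", "health", "diagnostic"],
   ["power", "utility", "electric", "water utility", "gas utility"],
   ["oil", "gas", "refining", "energy", "exploration"],
   ["steel", "metal", "mining", "paper", "chemical", "materials", "cement"],
   ["telecom", "media", "entertainment", "communication"],
   ["real estate", "reit", "property"],
   ["fmcg", "beverage", "foods", "consumer", "retail", "apparel"],
   ["auto", "automobile", "hotel", "travel", "leisure"],
   ["industrial", "engineering", "capital goods", "construction", "infrastructure", "logistics"]]

def flatFrom : List (List String) → Nat → List (String × Nat)
  | [], _ => []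
  | g :: gs, s => g.map (fun k => (k, s)) ++ flatFrom gs (s + 1)

def firstIdxG (c : String → Bool) : List (List String) → Nat → Option Nat
  | [], _ => none
  | g :: gs, s => if g.any c then some s else firstIdxG c gs (s + 1)

def hitsOf (c : String → Bool) (t : List (String × Nat)) : List Nat :=
  (t.filter (fun e => c e.1)).map (fun e => e.2)

lemma keywordTable_eq_flat : keywordTable = flatFrom kwGroups 0 := rfl

lemma hitsOf_append (c : String → Bool) (t u : List (String × Nat)) :
    hitsOf c (t ++ u) = hitsOf c t ++ hitsOf c u := by
  simp [hitsOf]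

lemma hitsOf_block (c : String → Bool) (kws : List String) (i : Nat) :
    hitsOf c (kws.map (fun k => (k, i))) = (kws.filter c).map (fun _ => i) := by
  induction kws with
  | nil => rfl
  | cons k ks ih =>
    by_cases h : c k = true <;> simp [hitsOf, h] at ih ⊢ <;> exact ih

lemma hitsOf_flat_lower (c : String → Bool) (gs : List (List String)) (s : Nat) :
    ∀ x ∈ hitsOf c (flatFrom gs s), s ≤ x := by
  induction gs generalizing s with
  | nil => intro x hx; simp [hitsOf, flatFrom] at hx
  | cons g gs ih =>
    intro x hx
    rw [flatFrom, hitsOf_append, hitsOf_block] at hx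
    rcases List.mem_append.1 hx with h | h
    · rcases List.mem_map.1 h with ⟨_, _, rfl⟩; exact le_refl s
    · exact Nat.le_of_succ_le (ih (s + 1) x h)

lemma foldl_min_eq_left (l : List Nat) (b : Nat) (h : ∀ x ∈ l, b ≤ x) :
    l.foldl min b = b := by
  induction l generalizing b with
  | nil => rfl
  | cons x l ih =>
    have hb : min b x = b := Nat.min_eq_left (h x (by simp))
    simp only [List.foldl, hb]
    exact ih b (fun y hy => h y (by simp [hy]))

lemma min?_hits_flat (c : String → Bool) (gs : List (List String)) (s : Nat) :
    PySem.List.min? (hitsOf c (flatFrom gs s)) (fun x => x) = firstIdxG c gs s := by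
  induction gs generalizing s with
  | nil => rfl
  | cons g gs ih =>
    rw [flatFrom, hitsOf_append, hitsOf_block, firstIdxG]
    by_cases h : g.any c = true
    · have hf : g.filter c ≠ [] := by
        simp only [ne_eq, List.filter_eq_nil_iff]
        rcases List.any_eq_true.1 h with ⟨k, hk, hck⟩
        exact fun hall => (by simpa using hall k hk hck)
      match hfe : g.filter c with
      | [] => exact absurd hfe hf
      | k :: ks =>
        simp only [List.map_cons, List.cons_append, h, if_true,
          PySem.List.min?_id_cons]
        congr 1
        apply foldl_min_eq_left
        intro x hx
        rcases List.mem_append.1 hx with hx | hx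
        · rcases List.mem_map.1 hx with ⟨_, _, rfl⟩; exact le_refl s
        · exact Nat.le_of_succ_le (hitsOf_flat_lower c gs (s + 1) x hx)
    · have hfe : g.filter c = [] := by
        simp only [List.filter_eq_nil_iff]
        intro k hk hck
        exact h (List.any_eq_true.2 ⟨k, hk, hck⟩)
      simp only [hfe, List.map_nil, List.nil_append, h]
      exact ih (s + 1)

-- Both ports with their 'let ind := lower industry' inlined (plain zeta/beta, proved by rfl).
lemma a_unfold (s : String) : infer_sector_from_industry s =
    (if ["bank", "nbfc", "finance", "financial", "insurance", "brok", "asset management"].any (fun k => PySem.Str.isIn k (PySem.Str.lower s)) then "Financial Services"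
    else if ["software", "it services", "information technology", "technology"].any (fun k => PySem.Str.isIn k (PySem.Str.lower s)) then "Technology"
    else if ["pharma", "pharmaceutical", "hospital", "health", "diagnostic"].any (fun k => PySem.Str.isIn k (PySem.Str.lower s)) then "Healthcare"
    else if ["power", "utility", "electric", "water utility", "gas utility"].any (fun k => PySem.Str.isIn k (PySem.Str.lower s)) then "Utilities"
    else if ["oil", "gas", "refining", "energy", "exploration"].any (fun k => PySem.Str.isIn k (PySem.Str.lower s)) then "Energy"
    else if ["steel", "metal", "mining", "paper", "chemical", "materials", "cement"].any (fun k => PySem.Str.isIn k (PySem.Str.lower s)) then "Basic Materials"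
    else if ["telecom", "media", "entertainment", "communication"].any (fun k => PySem.Str.isIn k (PySem.Str.lower s)) then "Communication Services"
    else if ["real estate", "reit", "property"].any (fun k => PySem.Str.isIn k (PySem.Str.lower s)) then "Real Estate"
    else if ["fmcg", "beverage", "foods", "consumer", "retail", "apparel"].any (fun k => PySem.Str.isIn k (PySem.Str.lower s)) then "Consumer Defensive"
    else if ["auto", "automobile", "hotel", "travel", "leisure"].any (fun k => PySem.Str.isIn k (PySem.Str.lower s)) then "Consumer Cyclical"
    else if ["industrial", "engineering", "capital goods", "construction", "infrastructure", "logistics"].any (fun k => PySem.Str.isIn k (PySem.Str.lower s)) then "Industrials"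
    else "Default") := rfl

lemma alt_unfold (s : String) : infer_sector_from_industry_alt s =
    (match PySem.List.min? (hitsOf (fun k => PySem.Str.isIn k (PySem.Str.lower s)) keywordTable) (fun x => x) with
    | some m => sectorNames.getD m "Default"
    | none => "Default") := rfl

-- A's if-chain, generically: first group (priority order) whose keyword matches picks its name.
def chainOf (c : String → Bool) : List (List String) → List String → String
  | g :: gs, n :: ns => if g.any c then n else chainOf c gs ns
  | _, _ => "Default"

lemma chain_gen (c : String → Bool) (full : List String) (gs : List (List String)) :
    ∀ s : Nat,
      (match firstIdxG c gs s with
       | some m => full.getD m "Default"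
       | none => "Default") = chainOf c gs (full.drop s) := by
  induction gs with
  | nil => intro s; cases full.drop s <;> simp [firstIdxG, chainOf]
  | cons g gs ih =>
    intro s
    rw [firstIdxG]
    by_cases h : g.any c = true
    · rw [if_pos h]
      cases hd : full.drop s with
      | nil =>
        have hlen : full.length ≤ s := List.drop_eq_nil_iff.mp hd
        simp [chainOf, List.getD_eq_getElem?_getD, List.getElem?_eq_none hlen]
      | cons n rest =>
        have hget : full[s]? = some n := by rw [← List.head?_drop, hd]; rfl
        simp [chainOf, h, List.getD_eq_getElem?_getD, hget]
    · rw [if_neg h, ih (s + 1)]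
      cases hd : full.drop s with
      | nil =>
        have : full.drop (s + 1) = [] := by rw [← List.tail_drop, hd]; rfl
        simp [chainOf, this]
      | cons n rest =>
        have : full.drop (s + 1) = rest := by rw [← List.tail_drop, hd]; rfl
        simp [chainOf, h, this]

-- ===== VERDICT =====
theorem infer_sector_from_industry_spec : Claim_equal_infer_sector_from_industry := by
  intro industry _
  unfold Spec_infer_sector_from_industry
  rw [a_unfold, alt_unfold, keywordTable_eq_flat, min?_hits_flat,
    chain_gen (fun k => PySem.Str.isIn k (PySem.Str.lower industry)) sectorNames kwGroups 0]
  rw [List.drop_zero]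
  rfl
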